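-- pv_equiv track=rewrite | github.com/rosscon/rosscon_advent_of_code | 2019/day_19/01.py | count_affected_coords
-- ===== SOURCE A (Python) =====
-- def count_affected_coords ( state, xp, yp ):
--     total = 0
--
--     for y in range(yp):
--         for x in range (xp):
--             if (x, y) in state:
--                 if state[(x, y)] :
--                     total += 1
--     return total
-- ===== SOURCE B (Python) =====
-- def count_affected_coords(state, xp, yp):
--     # One pass over the dict entries instead of scanning the whole grid.
--     return sum(1 for (x, y), v in state.items() if v and 0 <= x < xp and 0 <= y < yp)
-- ===== Notes on version B (the rewrite author's own statement) =====
-- stated objective: faster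
-- what changed: Instead of scanning every grid cell and probing the dict, B makes one pass over state.items() and counts truthy entries whose coordinates lie inside the grid bounds.
import Mathlib
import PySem

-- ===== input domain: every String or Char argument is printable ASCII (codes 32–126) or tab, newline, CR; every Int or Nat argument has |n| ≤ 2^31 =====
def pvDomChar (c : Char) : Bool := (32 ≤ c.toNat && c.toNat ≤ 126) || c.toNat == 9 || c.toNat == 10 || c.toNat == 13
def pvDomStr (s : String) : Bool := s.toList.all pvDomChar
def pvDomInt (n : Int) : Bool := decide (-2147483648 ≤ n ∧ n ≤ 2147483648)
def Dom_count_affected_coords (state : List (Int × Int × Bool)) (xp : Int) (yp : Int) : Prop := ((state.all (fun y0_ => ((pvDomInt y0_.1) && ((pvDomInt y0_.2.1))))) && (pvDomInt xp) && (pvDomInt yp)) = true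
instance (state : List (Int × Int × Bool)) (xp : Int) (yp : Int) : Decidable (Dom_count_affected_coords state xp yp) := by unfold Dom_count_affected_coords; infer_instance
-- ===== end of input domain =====

-- B replaces A's O(xp*yp) scan of every grid cell by one pass over the dict's entries.

-- the dict argument: association-list parameter as the Python dict {(x, y): b, …}
def pvToDict (state : List (Int × Int × Bool)) : PySem.Dict (Int × Int) Bool :=
  PySem.Dict.ofList (state.map (fun p => ((p.1, p.2.1), p.2.2)))

-- ===== PORT A =====
def count_affected_coords (state : List (Int × Int × Bool)) (xp : Int) (yp : Int) : Int :=
  (PySem.List.pyRange 0 yp 1).foldl (fun total y =>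
    (PySem.List.pyRange 0 xp 1).foldl (fun total x =>
      if (pvToDict state).contains (x, y) then
        -- state[(x, y)]: the key is present here, so getD returns exactly that value
        (if (pvToDict state).getD (x, y) false then total + 1 else total)
      else total) total) 0

-- ===== PORT B =====
def count_affected_coords_alt (state : List (Int × Int × Bool)) (xp : Int) (yp : Int) : Int :=
  (((pvToDict state).items.filter
      (fun p => p.2 && decide (0 ≤ p.1.1 ∧ p.1.1 < xp ∧ 0 ≤ p.1.2 ∧ p.1.2 < yp))).length : Int)

-- ===== PRECONDITION & SPEC =====
def Spec_count_affected_coords (state : List (Int × Int × Bool)) (xp : Int) (yp : Int) (out : Int) : Prop := out = count_affected_coords_alt state xp yp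
instance (state : List (Int × Int × Bool)) (xp : Int) (yp : Int) (out : Int) : Decidable (Spec_count_affected_coords state xp yp out) := by unfold Spec_count_affected_coords; infer_instance

-- ===== CLAIM (what is proved, stated in full; the proofs are below) =====
def Claim_equal_count_affected_coords : Prop := ∀ (state : List (Int × Int × Bool)) (xp : Int) (yp : Int), Dom_count_affected_coords state xp yp → Spec_count_affected_coords state xp yp (count_affected_coords state xp yp)

-- ===== LEMMAS AND PROOFS =====

-- A's nested membership/lookup test is the single test "get? = some true"
lemma pv_pred_eq (d : PySem.Dict (Int × Int) Bool) (k : Int × Int) (t : Int) :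
    (if d.contains k then (if d.getD k false then t + 1 else t) else t)
      = (if d.get? k == some true then t + 1 else t) := by
  rw [PySem.Dict.contains_eq_isSome_get?, PySem.Dict.getD_eq_get?_getD]
  cases h : d.get? k with
  | none => simp
  | some b => cases b <;> simp

-- A's double loop counts the grid points whose lookup is `some true`
lemma pv_A_eq_countP (d : PySem.Dict (Int × Int) Bool) (xp yp : Int) :
    (PySem.List.pyRange 0 yp 1).foldl (fun total y =>
      (PySem.List.pyRange 0 xp 1).foldl (fun total x =>
        if d.contains (x, y) then (if d.getD (x, y) false then total + 1 else total)
        else total) total) 0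
    = (((PySem.List.pyRange 0 yp 1).flatMap (fun y =>
          (PySem.List.pyRange 0 xp 1).map (fun x => ((x : Int), y)))).countP
        (fun k => d.get? k == some true) : Int) := by
  rw [PySem.List.foldl_congr_mem (g := fun total y =>
        total + ((PySem.List.pyRange 0 xp 1).countP
          (fun x => d.get? (x, y) == some true) : Int))]
  · rw [PySem.List.foldl_add]
    simp [List.countP_flatMap, Nat.cast_list_sum, List.map_map, Function.comp_def,
      List.countP_map]
  · intro acc y _
    rw [PySem.List.foldl_congr_mem (g := fun t x =>
          if d.get? (x, y) == some true then t + 1 else t)]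
    · rw [PySem.List.foldl_if_add_one]
    · intro t x _; exact pv_pred_eq d (x, y) t

-- membership in A's filtered grid list
lemma pv_mem_grid (xp yp : Int) (k : Int × Int) :
    k ∈ ((PySem.List.pyRange 0 yp 1).flatMap (fun y =>
          (PySem.List.pyRange 0 xp 1).map (fun x => ((x : Int), y))))
      ↔ (0 ≤ k.1 ∧ k.1 < xp ∧ 0 ≤ k.2 ∧ k.2 < yp) := by
  obtain ⟨kx, ky⟩ := k
  constructor
  · intro h
    obtain ⟨y, hy, h2⟩ := List.mem_flatMap.mp h
    obtain ⟨x, hx, he⟩ := List.mem_map.mp h2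
    cases he
    rw [PySem.List.mem_pyRange_one] at hy hx
    exact ⟨hx.1, hx.2, hy.1, hy.2⟩
  · rintro ⟨h1, h2, h3, h4⟩
    exact List.mem_flatMap.mpr ⟨ky, PySem.List.mem_pyRange_one.mpr ⟨h3, h4⟩,
      List.mem_map.mpr ⟨kx, PySem.List.mem_pyRange_one.mpr ⟨h1, h2⟩, rfl⟩⟩

-- the grid list has no duplicate points
lemma pv_nodup_grid (xp yp : Int) :
    ((PySem.List.pyRange 0 yp 1).flatMap (fun y =>
        (PySem.List.pyRange 0 xp 1).map (fun x => ((x : Int), y)))).Nodup := by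
  rw [List.nodup_flatMap]
  refine ⟨?_, ?_⟩
  · intro y _
    exact (PySem.List.nodup_pyRange_one 0 xp).map (fun a b h => by
      simpa using congrArg Prod.fst h)
  · have h := PySem.List.nodup_pyRange_one 0 yp
    refine h.imp ?_
    intro y1 y2 hne
    simp only [List.disjoint_left]
    rintro ⟨a, b⟩ h1 h2
    simp only [List.mem_map] at h1 h2
    obtain ⟨x1, _, e1⟩ := h1; obtain ⟨x2, _, e2⟩ := h2
    exact hne ((congrArg Prod.snd e1).trans (congrArg Prod.snd e2).symm)

-- the core counting identity, for any dict with nodup keys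
lemma pv_count_eq (d : PySem.Dict (Int × Int) Bool) (hnd : d.keys.Nodup) (xp yp : Int) :
    (((PySem.List.pyRange 0 yp 1).flatMap (fun y =>
          (PySem.List.pyRange 0 xp 1).map (fun x => ((x : Int), y)))).countP
        (fun k => d.get? k == some true))
    = (d.items.filter
        (fun p => p.2 && decide (0 ≤ p.1.1 ∧ p.1.1 < xp ∧ 0 ≤ p.1.2 ∧ p.1.2 < yp))).length := by
  set grid := ((PySem.List.pyRange 0 yp 1).flatMap (fun y =>
      (PySem.List.pyRange 0 xp 1).map (fun x => ((x : Int), y)))) with hgrid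
  set P : (Int × Int) × Bool → Bool :=
    fun p => p.2 && decide (0 ≤ p.1.1 ∧ p.1.1 < xp ∧ 0 ≤ p.1.2 ∧ p.1.2 < yp) with hP
  rw [List.countP_eq_length_filter]
  have hlen : (d.items.filter P).length = ((d.items.filter P).map Prod.fst).length := by
    rw [List.length_map]
  rw [hlen]
  have hnodup1 : (grid.filter (fun k => d.get? k == some true)).Nodup :=
    (pv_nodup_grid xp yp).filter _
  have hkeys : d.items.map Prod.fst = d.keys := rfl
  have hnodup2 : ((d.items.filter P).map Prod.fst).Nodup := by
    have hsub : List.Sublist ((d.items.filter P).map Prod.fst) (d.items.map Prod.fst) :=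
      List.Sublist.map Prod.fst List.filter_sublist
    exact (hkeys ▸ hnd).sublist hsub
  refine List.Perm.length_eq ((List.perm_ext_iff_of_nodup hnodup1 hnodup2).mpr ?_)
  intro k
  rw [List.mem_filter, pv_mem_grid]
  constructor
  · rintro ⟨hg, hv⟩
    have hv' : d.get? k = some true := by simpa using hv
    refine List.mem_map.mpr ⟨(k, true), ?_, rfl⟩
    rw [List.mem_filter]
    exact ⟨PySem.Dict.mem_items_of_get?_eq_some _ hv', by simp [hP, hg]⟩
  · intro hm
    obtain ⟨⟨k', v⟩, hmem, hk⟩ := List.mem_map.mp hm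
    cases hk
    rw [List.mem_filter] at hmem
    obtain ⟨hitems, hPv⟩ := hmem
    simp only [hP, Bool.and_eq_true, decide_eq_true_eq] at hPv
    obtain ⟨hv, hb⟩ := hPv
    have : v = true := hv
    subst this
    exact ⟨hb, by simp [PySem.Dict.get?_of_mem_items _ hitems hnd]⟩

-- ===== VERDICT (by name: the statement is the Claim_ definition above) =====
theorem count_affected_coords_spec : Claim_equal_count_affected_coords := by
  intro state xp yp _
  unfold Spec_count_affected_coords count_affected_coords count_affected_coords_alt
  rw [pv_A_eq_countP, pv_count_eq]
  exact PySem.Dict.nodup_keys_ofList _
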